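-- pv_equiv track=rewrite | github.com/mahakg290399/learning-dsa | Arrays/Lookup table.py | solution0
-- ===== SOURCE A (Python) =====
-- from itertools import combinations_with_replacement
--
-- def solution0(nums):
--     "Contains the solution"
--     count = 0
--     for combination in combinations_with_replacement(nums, 2):
--         sum_of_combination = sum(combination)
--         while sum_of_combination % 2 == 0 and sum_of_combination not in (1,0):
--             sum_of_combination = sum_of_combination//2
--         if sum_of_combination in (1,):
--             count += 1
--     return count
-- ===== SOURCE B (Python) =====
-- def solution0(nums):
--     "Contains the solution"
--     # One pass with a frequency map: for each element, look up how many earlier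
--     # elements complete it to a power of two.  Inputs are 32-bit-bounded ints
--     # (|x| <= 2**31), so every pair sum lies below 2**33.
--     powers = [1 << k for k in range(33)]
--     count = 0
--     seen = {}
--     for x in nums:
--         for p in powers:
--             count += seen.get(p - x, 0)
--         if 2 * x in powers:
--             count += 1
--         seen[x] = seen.get(x, 0) + 1
--     return count
-- ===== Notes on version B (the rewrite author's own statement) =====
-- stated objective: faster
-- what changed: Replaced A's scan over all O(n^2) pairs (each reduced by a halving loop) with a single pass that keeps a frequency map of elements seen so far and, for each element, looks up the 33 power-of-two complements in the map.
import Mathlib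
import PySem

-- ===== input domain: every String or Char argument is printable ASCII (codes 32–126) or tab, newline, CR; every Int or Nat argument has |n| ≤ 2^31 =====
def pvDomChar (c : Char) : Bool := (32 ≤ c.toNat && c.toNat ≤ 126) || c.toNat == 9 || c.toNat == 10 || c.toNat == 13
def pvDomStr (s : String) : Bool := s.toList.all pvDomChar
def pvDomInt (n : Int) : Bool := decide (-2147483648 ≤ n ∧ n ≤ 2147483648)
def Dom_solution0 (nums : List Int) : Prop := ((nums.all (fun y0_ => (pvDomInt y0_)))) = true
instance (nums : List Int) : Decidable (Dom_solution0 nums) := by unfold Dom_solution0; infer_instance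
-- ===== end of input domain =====

-- B replaces A's quadratic scan over all pairs by one pass with a frequency map,
-- looking each element up against the 33 possible power-of-two sums (faster, asymptotic).

-- ===== PORT A =====
-- the while loop: halve while even and not in (1, 0)
def reduceOdd (s : Int) : Int :=
  if h : PySem.Int.mod s 2 = 0 ∧ ¬(s = 1 ∨ s = 0) then reduceOdd (PySem.Int.floordiv s 2) else s
termination_by s.natAbs
decreasing_by
  have h2 : PySem.Int.mod s 2 = s % 2 := PySem.Int.mod_eq_emod_of_pos (by omega)
  have h3 : PySem.Int.floordiv s 2 = s / 2 := PySem.Int.floordiv_eq_ediv_of_pos (by omega)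
  rw [h3]; rw [h2] at h; omega

-- combinations_with_replacement(nums, 2), in iteration order
def cwr2 : List Int → List (Int × Int)
  | [] => []
  | x :: xs => ((x, x) :: xs.map (fun y => (x, y))) ++ cwr2 xs

def solution0 (nums : List Int) : Int :=
  (cwr2 nums).foldl (fun count c =>
    let s := reduceOdd (c.1 + c.2)
    if s = 1 then count + 1 else count) 0

-- ===== PORT B =====
def powersB : List Int := (List.range 33).map (fun k => 2 ^ k)

def solution0_alt (nums : List Int) : Int :=
  (nums.foldl (fun (st : Int × PySem.Dict Int Int) x =>
      let c1 := powersB.foldl (fun c p => c + st.2.getD (p - x) 0) st.1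
      let c2 := if powersB.contains (2 * x) then c1 + 1 else c1
      (c2, st.2.insert x (st.2.getD x 0 + 1)))
    (0, PySem.Dict.empty)).1

-- ===== PRECONDITION & SPEC =====
def Spec_solution0 (nums : List Int) (out : Int) : Prop := out = solution0_alt nums
instance (nums : List Int) (out : Int) : Decidable (Spec_solution0 nums out) := by unfold Spec_solution0; infer_instance

-- ===== CLAIM (what is proved, stated in full; the proofs are below) =====
def Claim_equal_solution0 : Prop := ∀ (nums : List Int), Dom_solution0 nums → Spec_solution0 nums (solution0 nums)

-- ===== LEMMAS AND PROOFS =====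

lemma reduceOdd_pow (k : Nat) : reduceOdd (2 ^ k) = 1 := by
  induction k with
  | zero => rw [reduceOdd.eq_def]; simp [PySem.Int.mod]
  | succ k ih =>
      rw [reduceOdd.eq_def]
      have h2 : PySem.Int.mod ((2:Int) ^ (k+1)) 2 = (2:Int) ^ (k+1) % 2 :=
        PySem.Int.mod_eq_emod_of_pos (by omega)
      have h3 : PySem.Int.floordiv ((2:Int) ^ (k+1)) 2 = (2:Int) ^ (k+1) / 2 :=
        PySem.Int.floordiv_eq_ediv_of_pos (by omega)
      have hp : (2:Int) ^ (k+1) = 2 * 2 ^ k := by ring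
      have hpos : (1:Int) ≤ 2 ^ k := one_le_pow₀ (by norm_num)
      rw [dif_pos ⟨by rw [h2, hp]; omega, by rw [hp]; omega⟩]
      rw [h3, hp, Int.mul_ediv_cancel_left _ (by norm_num)]; exact ih

lemma reduceOdd_eq_one_pow (s : Int) (h : reduceOdd s = 1) : ∃ k : Nat, s = 2 ^ k := by
  generalize hn : s.natAbs = n at *
  induction n using Nat.strong_induction_on generalizing s with
  | _ n ih =>
      rw [reduceOdd.eq_def] at h
      by_cases hc : PySem.Int.mod s 2 = 0 ∧ ¬(s = 1 ∨ s = 0)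
      · rw [dif_pos hc] at h
        have h2 : PySem.Int.mod s 2 = s % 2 := PySem.Int.mod_eq_emod_of_pos (by omega)
        have h3 : PySem.Int.floordiv s 2 = s / 2 := PySem.Int.floordiv_eq_ediv_of_pos (by omega)
        rw [h2] at hc; rw [h3] at h
        obtain ⟨k, hk⟩ := ih (s / 2).natAbs (by omega) _ h rfl
        exact ⟨k + 1, by rw [pow_succ]; omega⟩
      · rw [dif_neg hc] at h
        exact ⟨0, by simpa using h⟩

lemma mem_powersB (s : Int) : s ∈ powersB ↔ ∃ k : Nat, k < 33 ∧ s = 2 ^ k := by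
  simp [powersB, List.mem_map, List.mem_range, eq_comm]

lemma reduceOdd_iff_mem (s : Int) (hs : s ≤ 2 ^ 32) : (reduceOdd s = 1 ↔ s ∈ powersB) := by
  constructor
  · intro h
    obtain ⟨k, hk⟩ := reduceOdd_eq_one_pow s h
    rw [mem_powersB]
    refine ⟨k, ?_, hk⟩
    by_contra hge
    have h33 : (2:Int) ^ 33 ≤ 2 ^ k := pow_le_pow_right₀ (by norm_num) (by omega)
    rw [hk] at hs; norm_num at h33 hs; omega
  · intro h
    obtain ⟨k, _, hk⟩ := (mem_powersB s).mp h
    rw [hk]; exact reduceOdd_pow k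

lemma nodup_powersB : powersB.Nodup := by decide

lemma mem_cwr2 (l : List Int) (c : Int × Int) (h : c ∈ cwr2 l) : c.1 ∈ l ∧ c.2 ∈ l := by
  induction l with
  | nil => simp [cwr2] at h
  | cons x xs ih =>
      simp only [cwr2, List.mem_append, List.mem_cons, List.mem_map] at h
      rcases h with (h | ⟨y, hy, h⟩) | h
      · subst h; simp
      · subst h; simp [hy]
      · have := ih h; simp [this.1, this.2]

-- the "good pair" count both programs compute
def goodCount (l : List Int) : Nat :=
  (cwr2 l).countP (fun c => decide (c.1 + c.2 ∈ powersB))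

lemma countP_cwr2_snoc (l : List Int) (x : Int) (q : Int × Int → Bool) :
    (cwr2 (l ++ [x])).countP q =
      (cwr2 l).countP q + l.countP (fun y => q (y, x)) + (if q (x, x) then 1 else 0) := by
  induction l with
  | nil => simp [cwr2]
  | cons a t ih =>
      simp only [List.cons_append, cwr2, List.countP_append, List.countP_cons, List.map_append,
        List.countP_map, ih, List.map_cons]
      simp
      split_ifs <;> omega

lemma sum_indicator_nodup (ps : List Int) (hnd : ps.Nodup) (v : Int) :
    (ps.map (fun p => if p = v then (1:Int) else 0)).sum = if v ∈ ps then (1:Int) else 0 := by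
  induction ps with
  | nil => simp
  | cons a t ih =>
      simp only [List.nodup_cons] at hnd
      simp only [List.map_cons, List.sum_cons, ih hnd.2, List.mem_cons]
      by_cases hav : a = v
      · subst hav; simp [hnd.1]
      · simp [hav, Ne.symm hav]

lemma sum_counts_eq_countP (l : List Int) (x : Int) :
    (powersB.map (fun p => (l.count (p - x) : Int))).sum =
      (l.countP (fun y => decide (y + x ∈ powersB)) : Int) := by
  induction l with
  | nil => simp
  | cons y t ih =>
      have hsplit : ∀ p : Int, ((y :: t).count (p - x) : Int) =
          (t.count (p - x) : Int) + (if p = y + x then (1:Int) else 0) := by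
        intro p
        simp only [List.count_cons, beq_iff_eq]
        by_cases h : p = y + x
        · rw [if_pos (by omega : y = p - x), if_pos h]; push_cast; ring
        · rw [if_neg (by omega : ¬ y = p - x), if_neg h]; push_cast; ring
      calc (powersB.map (fun p => ((y :: t).count (p - x) : Int))).sum
          = (powersB.map (fun p => (t.count (p - x) : Int) + (if p = y + x then (1:Int) else 0))).sum := by
            exact congrArg List.sum (List.map_congr_left (fun p _ => hsplit p))
        _ = (powersB.map (fun p => (t.count (p - x) : Int))).sum
            + (powersB.map (fun p => if p = y + x then (1:Int) else 0)).sum := by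
            rw [← List.sum_map_add]
        _ = (t.countP (fun y => decide (y + x ∈ powersB)) : Int)
            + (if y + x ∈ powersB then (1:Int) else 0) := by
            rw [ih, sum_indicator_nodup powersB nodup_powersB]
        _ = ((y :: t).countP (fun y => decide (y + x ∈ powersB)) : Int) := by
            rw [List.countP_cons]
            by_cases h : y + x ∈ powersB <;> simp [h]

lemma goodCount_snoc (l : List Int) (x : Int) :
    (goodCount (l ++ [x]) : Int) = (goodCount l : Int)
      + (l.countP (fun y => decide (y + x ∈ powersB)) : Int)
      + (if (x + x) ∈ powersB then (1:Int) else 0) := by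
  unfold goodCount
  rw [countP_cwr2_snoc (q := fun c : Int × Int => decide (c.1 + c.2 ∈ powersB))]
  push_cast
  by_cases h : (x + x) ∈ powersB
  · rw [if_pos (by simpa using h), if_pos h]
  · rw [if_neg (by simpa using h), if_neg h]

-- B's fold state after processing l
lemma alt_state (l : List Int) :
    l.foldl (fun (st : Int × PySem.Dict Int Int) x =>
      let c1 := powersB.foldl (fun c p => c + st.2.getD (p - x) 0) st.1
      let c2 := if powersB.contains (2 * x) then c1 + 1 else c1
      (c2, st.2.insert x (st.2.getD x 0 + 1)))
    (0, PySem.Dict.empty)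
    = ((goodCount l : Int),
       l.foldl (fun (d : PySem.Dict Int Int) x => d.insert x (d.getD x 0 + 1)) PySem.Dict.empty) := by
  induction l using List.reverseRecOn with
  | nil => simp [goodCount, cwr2]
  | append_singleton l x ih =>
      rw [List.foldl_append, List.foldl_append, ih]
      simp only [List.foldl_cons, List.foldl_nil]
      refine Prod.ext ?_ rfl
      show (if powersB.contains (2 * x) then _ + 1 else _) = (goodCount (l ++ [x]) : Int)
      rw [PySem.List.foldl_add (g := fun p => ((l.foldl (fun (d : PySem.Dict Int Int) x => d.insert x (d.getD x 0 + 1)) PySem.Dict.empty).getD (p - x) 0))]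
      have hget : ∀ p : Int,
          (l.foldl (fun (d : PySem.Dict Int Int) x => d.insert x (d.getD x 0 + 1)) PySem.Dict.empty).getD (p - x) 0
            = (l.count (p - x) : Int) := by
        intro p
        rw [PySem.Dict.getD_foldl_insert_add_one]
        simp
      have hmapeq : powersB.map (fun p =>
          (l.foldl (fun (d : PySem.Dict Int Int) x => d.insert x (d.getD x 0 + 1)) PySem.Dict.empty).getD (p - x) 0)
          = powersB.map (fun p => (l.count (p - x) : Int)) :=
        List.map_congr_left (fun p _ => hget p)
      rw [hmapeq, sum_counts_eq_countP, goodCount_snoc]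
      have hcont : powersB.contains (2 * x) = decide ((x + x) ∈ powersB) := by
        have : 2 * x = x + x := by ring
        rw [this]; simp
      rw [hcont]
      by_cases h : (x + x) ∈ powersB
      · rw [if_pos (by simpa using h), if_pos h]
      · rw [if_neg (by simpa using h), if_neg h]; ring

lemma solution0_eq_goodCount (nums : List Int) (hd : Dom_solution0 nums) :
    solution0 nums = (goodCount nums : Int) := by
  unfold solution0 goodCount
  rw [PySem.List.foldl_ite_add_one (p := fun c : Int × Int => reduceOdd (c.1 + c.2) = 1)]
  rw [zero_add]
  congr 1
  apply List.countP_congr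
  intro c hc
  have hm := mem_cwr2 nums c hc
  unfold Dom_solution0 at hd
  rw [List.all_eq_true] at hd
  have h1 := hd c.1 hm.1
  have h2 := hd c.2 hm.2
  simp only [pvDomInt, decide_eq_true_eq] at h1 h2
  have hs : c.1 + c.2 ≤ 2 ^ 32 := by omega
  simp [reduceOdd_iff_mem _ hs]

-- ===== VERDICT (by name: the statement is the Claim_ definition above) =====
theorem solution0_spec : Claim_equal_solution0 := by
  intro nums hd
  show solution0 nums = solution0_alt nums
  rw [solution0_eq_goodCount nums hd]
  unfold solution0_alt
  rw [alt_state]
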